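-- pv_equiv track=rewrite | github.com/TonyE20/python_data_structure | python_data_structure.py | two_list_dictionary
-- ===== SOURCE A (Python) =====
-- def two_list_dictionary(keys, values):
--     if len(keys) <= len(values):
--        return { keys[key]: values[key] for key in range(len(keys))}
--     elif len(keys) > len(values):
--         element_1 = {keys[key]: values[key] for key in range(len(values))}
--         element_2 = {keys[key]: None for key in range(len(values), len(keys))}
--         element_1.update(element_2)
--         return element_1
--
--     """Given keys and values, make dictionary of those.
--
--         >>> two_list_dictionary(['x', 'y', 'z'], [9, 8, 7])
--         {'x': 9, 'y': 8, 'z': 7}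
--
--     If there are fewer values than keys, remaining keys should have value
--     of None:
--
--         >>> two_list_dictionary(['a', 'b', 'c', 'd'], [1, 2, 3])
--         {'a': 1, 'b': 2, 'c': 3, 'd': None}
--
--     If there are fewer keys, ignore remaining values:
--
--         >>> two_list_dictionary(['a', 'b', 'c'], [1, 2, 3, 4])
--         {'a': 1, 'b': 2, 'c': 3}
--    """
-- ===== SOURCE B (Python) =====
-- def two_list_dictionary(keys, values):
--     result = {}
--     vit = iter(values)
--     for k in keys:
--         result[k] = next(vit, None)
--     return result
-- ===== Notes on version B (the rewrite author's own statement) =====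
-- stated objective: simpler
-- what changed: B replaces A's two-way length branch with dual index-range dict comprehensions and a merge by a single pass over keys that consumes a value iterator via next(vit, None), so pairing and None-padding happen in one loop with no length test, indexing or slicing.
import Mathlib
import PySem

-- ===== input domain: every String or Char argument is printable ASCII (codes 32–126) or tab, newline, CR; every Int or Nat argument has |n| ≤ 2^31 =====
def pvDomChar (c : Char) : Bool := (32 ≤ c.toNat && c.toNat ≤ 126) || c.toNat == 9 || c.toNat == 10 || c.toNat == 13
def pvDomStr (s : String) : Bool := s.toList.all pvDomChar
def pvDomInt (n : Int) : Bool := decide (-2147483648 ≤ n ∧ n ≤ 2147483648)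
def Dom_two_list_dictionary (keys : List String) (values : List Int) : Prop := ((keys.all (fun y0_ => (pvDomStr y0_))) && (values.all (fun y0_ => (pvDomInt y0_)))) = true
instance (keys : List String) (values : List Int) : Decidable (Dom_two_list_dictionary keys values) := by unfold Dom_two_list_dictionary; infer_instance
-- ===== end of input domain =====

-- B replaces A's two-way length branch and dual index-range comprehensions with a single pass
-- over keys that consumes the values one by one, writing None once they run out (objective: simpler).

-- ===== PORT A =====
def two_list_dictionary (keys : List String) (values : List Int) : List (String × Option Int) :=
  if keys.length ≤ values.length then
    ((PySem.List.pyRange 0 (keys.length : Int) 1).foldl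
        (fun d key => d.insert (PySem.List.pyGetD keys key "") (some (PySem.List.pyGetD values key 0)))
        PySem.Dict.empty).items
  else if values.length < keys.length then
    let element_1 := (PySem.List.pyRange 0 (values.length : Int) 1).foldl
        (fun d key => d.insert (PySem.List.pyGetD keys key "") (some (PySem.List.pyGetD values key 0)))
        PySem.Dict.empty
    let element_2 := (PySem.List.pyRange (values.length : Int) (keys.length : Int) 1).foldl
        (fun d key => d.insert (PySem.List.pyGetD keys key "") (none : Option Int))
        PySem.Dict.empty
    (element_1.update element_2.items).items
  else [] -- unreachable: the two branches are exhaustive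

-- ===== PORT B =====
-- result = {}; vit = iter(values); for k in keys: result[k] = next(vit, None); return result
-- the fold state is (result, the values the iterator has not yet yielded)
def two_list_dictionary_alt (keys : List String) (values : List Int) : List (String × Option Int) :=
  (keys.foldl
      (fun (p : PySem.Dict String (Option Int) × List Int) k =>
        match p.2 with
        | [] => (p.1.insert k none, [])
        | v :: vs => (p.1.insert k (some v), vs))
      ((PySem.Dict.empty : PySem.Dict String (Option Int)), values)).1.items

-- ===== PRECONDITION & SPEC =====
def Spec_two_list_dictionary (keys : List String) (values : List Int) (out : List (String × Option Int)) : Prop := out = two_list_dictionary_alt keys values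
instance (keys : List String) (values : List Int) (out : List (String × Option Int)) : Decidable (Spec_two_list_dictionary keys values out) := by unfold Spec_two_list_dictionary; infer_instance

-- ===== CLAIM (what is proved, stated in full; the proofs are below) =====
def Claim_equal_two_list_dictionary : Prop := ∀ (keys : List String) (values : List Int), Dom_two_list_dictionary keys values → Spec_two_list_dictionary keys values (two_list_dictionary keys values)

-- ===== LEMMAS AND PROOFS =====

-- folding an association list whose keys avoid k does not change the lookup at k
lemma pv_fold_get_pres (k : String) (l : List (String × Option Int)) (d : PySem.Dict String (Option Int))
    (h : k ∉ l.map Prod.fst) :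
    (l.foldl (fun d p => d.insert p.1 p.2) d).get? k = d.get? k := by
  induction l generalizing d with
  | nil => rfl
  | cons p l ih =>
      simp only [List.map_cons, List.mem_cons, not_or] at h
      simp only [List.foldl_cons]
      rw [ih _ h.2]
      exact PySem.Dict.get?_insert_of_ne _ _ h.1

-- if every entry of l at key k carries none and k occurs, the folded dict looks up none at k
lemma pv_fold_get_none (k : String) (l : List (String × Option Int)) (d : PySem.Dict String (Option Int))
    (hmem : k ∈ l.map Prod.fst) (hv : ∀ p ∈ l, p.1 = k → p.2 = none) :
    (l.foldl (fun d p => d.insert p.1 p.2) d).get? k = some none := by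
  induction l generalizing d with
  | nil => simp at hmem
  | cons p l ih =>
      simp only [List.foldl_cons]
      by_cases hk : k ∈ l.map Prod.fst
      · exact ih _ hk (fun q hq => hv q (List.mem_cons_of_mem _ hq))
      · have hp1 : p.1 = k := by
          simp only [List.map_cons, List.mem_cons] at hmem
          tauto
        have hp2 : p.2 = none := hv p (List.mem_cons_self) hp1
        rw [pv_fold_get_pres _ _ _ hk, hp1, hp2, PySem.Dict.get?_insert_self]

-- inserting the value a key already has changes nothing
lemma pv_insert_same (d : PySem.Dict String (Option Int)) (k : String) (v : Option Int)
    (hnd : d.keys.Nodup) (h : d.get? k = some v) : d.insert k v = d := by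
  apply PySem.Dict.ext
  have hc : d.contains k = true := by rw [PySem.Dict.contains_eq_isSome_get?, h]; rfl
  rw [PySem.Dict.items_insert_of_contains _ _ hc]
  have : ∀ p ∈ d.items, (if (p.1 == k) = true then (k, v) else p) = p := by
    intro p hp
    by_cases hpk : p.1 = k
    · have hg : d.get? p.1 = some p.2 := PySem.Dict.get?_of_mem_items d hp hnd
      rw [hpk, h] at hg
      have hv : v = p.2 := Option.some.inj hg
      simp [hpk, Prod.ext_iff, hv]
    · simp [hpk]
  simpa using List.map_congr_left this

-- pushing one None-insert through the items-fold
lemma pv_step (e d : PySem.Dict String (Option Int)) (k : String)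
    (hev : ∀ p ∈ e.items, p.2 = (none : Option Int)) (hd : d.keys.Nodup) :
    ((e.insert k none).items).foldl (fun d p => d.insert p.1 p.2) d
      = ((e.items).foldl (fun d p => d.insert p.1 p.2) d).insert k none := by
  by_cases hc : e.contains k = true
  · have hitems : (e.insert k (none : Option Int)).items
        = List.map (fun p => if (p.1 == k) = true then (k, none) else p) e.items :=
      PySem.Dict.items_insert_of_contains _ _ hc
    have hmap : List.map (fun p => if (p.1 == k) = true then (k, (none : Option Int)) else p) e.items
        = e.items := by
      rw [List.map_congr_left (fun p hp => ?_), List.map_id]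
      by_cases hpk : p.1 = k
      · have hv := hev p hp
        simp [hpk, Prod.ext_iff, hv]
      · simp [hpk]
    rw [hitems, hmap]
    have hnd : ((e.items).foldl (fun d p => d.insert p.1 p.2) d).keys.Nodup :=
      PySem.Dict.nodup_keys_foldl_insert_key e.items Prod.fst (fun _ p => p.2) d hd
    have hkmem : k ∈ e.items.map Prod.fst := by
      have := PySem.Dict.contains_iff_mem_keys (d := e) (k := k)
      exact this.mp hc
    have hget : ((e.items).foldl (fun d p => d.insert p.1 p.2) d).get? k = some none :=
      pv_fold_get_none k e.items d hkmem (fun p hp _ => hev p hp)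
    rw [pv_insert_same _ k none hnd hget]
  · rw [PySem.Dict.items_insert_of_not_contains _ _ (by simpa using hc), List.foldl_append]
    rfl

-- merging a None-dict built from ks into d equals inserting the ks directly
lemma pv_merge (ks : List String) (e d : PySem.Dict String (Option Int))
    (hev : ∀ p ∈ e.items, p.2 = (none : Option Int)) (hd : d.keys.Nodup) :
    ((ks.foldl (fun d k => d.insert k (none : Option Int)) e).items).foldl
        (fun d p => d.insert p.1 p.2) d
      = ks.foldl (fun d k => d.insert k (none : Option Int))
          ((e.items).foldl (fun d p => d.insert p.1 p.2) d) := by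
  induction ks generalizing e with
  | nil => rfl
  | cons k ks ih =>
      simp only [List.foldl_cons]
      have hev' : ∀ p ∈ (e.insert k (none : Option Int)).items, p.2 = (none : Option Int) := by
        intro p hp
        rcases (PySem.Dict.mem_items_insert e k none p).mp hp with h | h
        · rw [h]
        · exact hev p h.1
      rw [ih (e.insert k none) hev', pv_step e d k hev hd]

-- the index-range comprehension over the common prefix is the zip fold
lemma pv_zip (ks : List String) (vs : List Int) (d : PySem.Dict String (Option Int)) :
    (List.range (min ks.length vs.length)).foldl
        (fun d k => d.insert (ks.getD k "") (some (vs.getD k 0))) d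
      = (ks.zip vs).foldl (fun d p => d.insert p.1 (some p.2)) d := by
  induction ks generalizing vs d with
  | nil => simp
  | cons x ks ih =>
      cases vs with
      | nil => simp
      | cons v vs =>
          have hmin : min (x :: ks).length (v :: vs).length = min ks.length vs.length + 1 := by
            simp [Nat.succ_min_succ]
          rw [hmin, List.range_succ_eq_map, List.foldl_cons, List.foldl_map]
          simpa using ih vs (d.insert x (some v))

-- bridge: A's pyRange/pyGetD comprehension in terms of List.range/getD
lemma pv_bridge (ks : List String) (vs : List Int) (n : Nat) :
    (PySem.List.pyRange 0 (n : Int) 1).foldl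
        (fun d key => d.insert (PySem.List.pyGetD ks key "") (some (PySem.List.pyGetD vs key 0)))
        (PySem.Dict.empty : PySem.Dict String (Option Int))
      = (List.range n).foldl
          (fun d k => d.insert (ks.getD k "") (some (vs.getD k 0))) PySem.Dict.empty := by
  rw [PySem.List.pyRange_zero_nat, List.foldl_map]
  simp [PySem.List.pyGetD_natCast]

-- B's single pass equals the staged zip-then-pad construction
lemma pv_single (ks : List String) (vs : List Int) (d : PySem.Dict String (Option Int)) :
    (ks.foldl
        (fun (p : PySem.Dict String (Option Int) × List Int) k =>
          match p.2 with
          | [] => (p.1.insert k none, [])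
          | v :: vs => (p.1.insert k (some v), vs))
        (d, vs)).1
      = (ks.drop vs.length).foldl (fun d k => d.insert k (none : Option Int))
          ((ks.zip vs).foldl (fun d p => d.insert p.1 (some p.2)) d) := by
  induction ks generalizing vs d with
  | nil => simp
  | cons k ks ih =>
      cases vs with
      | nil => simpa using ih [] (d.insert k none)
      | cons v vs => simpa using ih vs (d.insert k (some v))

-- ===== VERDICT (by name: the statement is the Claim_ definition above) =====
theorem two_list_dictionary_spec : Claim_equal_two_list_dictionary := by
  intro keys values _
  unfold Spec_two_list_dictionary two_list_dictionary two_list_dictionary_alt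
  rw [pv_single]
  split_ifs with h1 h2
  · -- keys.length ≤ values.length: the pad list is empty
    rw [List.drop_eq_nil_of_le h1, List.foldl_nil]
    have hmin : min keys.length values.length = keys.length := Nat.min_eq_left h1
    rw [pv_bridge, ← hmin, pv_zip]
  · -- values.length < keys.length
    have hmin : min keys.length values.length = values.length := Nat.min_eq_right (le_of_lt h2)
    have he2 : (PySem.List.pyRange (values.length : Int) (keys.length : Int) 1).foldl
        (fun d key => d.insert (PySem.List.pyGetD keys key "") (none : Option Int))
        (PySem.Dict.empty : PySem.Dict String (Option Int))
      = (keys.drop values.length).foldl (fun d k => d.insert k (none : Option Int))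
          PySem.Dict.empty := by
      have := PySem.List.foldl_pyRange_pyGetD' keys ""
        (fun (d : PySem.Dict String (Option Int)) k => d.insert k (none : Option Int))
        (PySem.Dict.empty : PySem.Dict String (Option Int))
        (a := (values.length : Int)) (by positivity)
      simpa using this
    simp only [PySem.Dict.update]
    rw [he2, pv_merge _ _ _ (by intro p hp; simp [PySem.Dict.empty] at hp) ?_,
        pv_bridge, ← hmin, pv_zip]
    · rfl
    · rw [pv_bridge, ← hmin, pv_zip]
      exact PySem.Dict.nodup_keys_foldl_insert_key _ _ _ _ (by simp [PySem.Dict.keys, PySem.Dict.empty])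
  · omega
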